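-- pv_equiv track=rewrite | github.com/danieldinella/Python | Homework/HW4-req/program01.py | confronta_ab
-- ===== SOURCE A (Python) =====
-- def confronta_ab(a,b,tau):
--     indice=0    # indice degli 1 in b
--     x=0     # valore da ritornare
--
--     for i in range(b.count(1)): # ciclo per confrontare tutti gli 1 in b
--         indice = b[indice:].index(1) + indice   # assegnazione dell'indice
--
--         if indice < tau:    # controllo per i primi indici inferiori di tau
--             slice_a = a[:indice+1]  # si considera solo da inizio lista all'indice
--
--         else:
--             slice_a = a[indice-tau:indice+1]    # altrimenti solo dall'indice - tau all'indice
--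
--         if 1 in slice_a:    # se l'1 è presente all'ora il valore aumenta di 1
--             x+=1
--         indice+=1   # scorro l'indice in avanti
--
--     return x    # ritorno il valore
-- ===== SOURCE B (Python) =====
-- def confronta_ab(a, b, tau):
--     # one pass over b, maintaining the nearest preceding 1-index of a
--     last = -1
--     x = 0
--     n = len(a)
--     for i, v in enumerate(b):
--         if i < n and a[i] == 1:
--             last = i
--         if v == 1 and last >= 0 and last >= i - tau:
--             x += 1
--     return x
-- ===== Notes on version B (the rewrite author's own statement) =====
-- stated objective: alternative
-- what changed: A rescans b with repeated .index calls and slices a window of a for every 1 found; B makes one simultaneous pass over b while maintaining the nearest preceding 1-index of a, answering each window query in O(1) without any slicing.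
import Mathlib
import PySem

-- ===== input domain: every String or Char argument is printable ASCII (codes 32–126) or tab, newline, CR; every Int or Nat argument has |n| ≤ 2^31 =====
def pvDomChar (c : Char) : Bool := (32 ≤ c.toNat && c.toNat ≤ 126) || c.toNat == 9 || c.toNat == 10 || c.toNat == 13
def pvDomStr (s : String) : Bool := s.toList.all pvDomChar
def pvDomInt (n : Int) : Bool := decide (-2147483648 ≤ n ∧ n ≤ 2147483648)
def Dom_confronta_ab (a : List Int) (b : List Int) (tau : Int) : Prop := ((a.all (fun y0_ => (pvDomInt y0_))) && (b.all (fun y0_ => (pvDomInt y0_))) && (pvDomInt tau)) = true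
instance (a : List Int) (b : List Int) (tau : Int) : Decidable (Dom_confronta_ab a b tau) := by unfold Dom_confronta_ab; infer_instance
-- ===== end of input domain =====

-- B replaces A's repeated `.index` rescans of b and per-hit window slices of a by one
-- simultaneous pass that maintains the nearest preceding 1-index of a (objective: alternative).

-- ===== PORT A =====
-- loop body of A (state = (indice, x)); the `none` branch of index? is Python's
-- ValueError and is unreachable, since the loop runs exactly b.count(1) times
def pvStepA (a : List Int) (b : List Int) (tau : Int) (st : Int × Int) : Int × Int :=
  match PySem.List.index? (PySem.List.slice b (some st.1) none) 1 with
  | none => st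
  | some f =>
    let indice : Int := (f : Int) + st.1
    let slice_a := if indice < tau then PySem.List.slice a none (some (indice + 1))
                   else PySem.List.slice a (some (indice - tau)) (some (indice + 1))
    let x : Int := if slice_a.contains 1 then st.2 + 1 else st.2
    (indice + 1, x)

def confronta_ab (a : List Int) (b : List Int) (tau : Int) : Int :=
  ((List.range (PySem.List.count b 1)).foldl (fun st _ => pvStepA a b tau st)
    ((0 : Int), (0 : Int))).2

-- ===== PORT B =====
-- loop body of B (state = (last, x)); `i < n and a[i] == 1` is ported with pyGetD,
-- exact because the read is guarded by i < n
def pvStepB (a : List Int) (tau : Int) (st : Int × Int) (iv : Int × Int) : Int × Int :=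
  let last : Int := if iv.1 < (a.length : Int) ∧ PySem.List.pyGetD a iv.1 0 = 1 then iv.1 else st.1
  (last, if iv.2 = 1 ∧ 0 ≤ last ∧ iv.1 - tau ≤ last then st.2 + 1 else st.2)

def confronta_ab_alt (a : List Int) (b : List Int) (tau : Int) : Int :=
  ((PySem.List.enumerate b 0).foldl (pvStepB a tau) ((-1 : Int), (0 : Int))).2

-- ===== PRECONDITION & SPEC =====
def Spec_confronta_ab (a : List Int) (b : List Int) (tau : Int) (out : Int) : Prop := out = confronta_ab_alt a b tau
instance (a : List Int) (b : List Int) (tau : Int) (out : Int) : Decidable (Spec_confronta_ab a b tau out) := by unfold Spec_confronta_ab; infer_instance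

-- ===== CLAIM (what is proved, stated in full; the proofs are below) =====
def Claim_equal_confronta_ab : Prop := ∀ (a : List Int) (b : List Int) (tau : Int), Dom_confronta_ab a b tau → Spec_confronta_ab a b tau (confronta_ab a b tau)

-- ===== LEMMAS AND PROOFS =====

-- nearest 1-index of a strictly below s (-1 if none)
def pvLastOne (a : List Int) : Nat → Int
  | 0 => -1
  | s + 1 => if s < a.length ∧ a.getD s 0 = 1 then (s : Int) else pvLastOne a s

-- number of hits contributed by the suffix t of b starting at absolute index s
def pvCnt (a : List Int) (tau : Int) : List Int → Nat → Int
  | [], _ => 0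
  | v :: t, s =>
      (if v = 1 ∧ 0 ≤ pvLastOne a (s + 1) ∧ (s : Int) - tau ≤ pvLastOne a (s + 1) then 1 else 0)
      + pvCnt a tau t (s + 1)

theorem pvLastOne_lt (a : List Int) (t : Nat) : pvLastOne a t < (t : Int) := by
  induction t with
  | zero => simp [pvLastOne]
  | succ s ih =>
    simp only [pvLastOne]
    split_ifs with h
    · push_cast; omega
    · push_cast; omega

theorem pvWindow (a : List Int) (t d : Nat) :
    (1 : Int) ∈ (a.take t).drop d ↔ (d : Int) ≤ pvLastOne a t := by
  induction t with
  | zero =>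
    simp only [List.take_zero, List.drop_nil, List.not_mem_nil, pvLastOne]
    constructor
    · intro h; exact absurd h (by simp)
    · intro h; omega
  | succ s ih =>
    by_cases hs : s < a.length
    · have htake : a.take (s + 1) = a.take s ++ [a[s]] := by
        rw [List.take_add_one, List.getElem?_eq_getElem hs]; rfl
      by_cases hd : d ≤ s
      · have hlen : d ≤ (a.take s).length := by simp; omega
        rw [htake, List.drop_append_of_le_length hlen]
        simp only [List.mem_append, List.mem_singleton]
        by_cases h1 : a[s] = 1
        · have : pvLastOne a (s + 1) = (s : Int) := by
            simp [pvLastOne, hs, List.getD_eq_getElem?_getD, h1]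
          rw [this]
          constructor
          · intro _; omega
          · intro _; right; exact h1.symm
        · have : pvLastOne a (s + 1) = pvLastOne a s := by
            simp [pvLastOne, hs, List.getD_eq_getElem?_getD, h1]
          rw [this, ← ih]
          constructor
          · rintro (h | h)
            · exact h
            · exact absurd h.symm h1
          · intro h; left; exact h
      · have hlen : (a.take (s + 1)).length = s + 1 := by simp; omega
        have : (a.take (s + 1)).drop d = [] := by
          apply List.drop_eq_nil_of_le; omega
        rw [this]
        simp only [List.not_mem_nil]
        have := pvLastOne_lt a (s + 1)
        constructor
        · intro h; exact absurd h (by simp)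
        · intro h; push_cast at this; omega
    · have hle : a.length ≤ s := by omega
      have htake : a.take (s + 1) = a.take s := by
        rw [List.take_add_one]; simp [List.getElem?_eq_none hle]
      have hlast : pvLastOne a (s + 1) = pvLastOne a s := by
        simp [pvLastOne, hs]
      rw [htake, hlast, ih]

-- the slice-membership test of A equals the pvLastOne condition
theorem pvCondA (a : List Int) (tau : Int) (i : Nat) :
    ((if (i : Int) < tau then PySem.List.slice a none (some ((i : Int) + 1))
      else PySem.List.slice a (some ((i : Int) - tau)) (some ((i : Int) + 1))).contains 1 = true)
    ↔ (0 ≤ pvLastOne a (i + 1) ∧ (i : Int) - tau ≤ pvLastOne a (i + 1)) := by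
  split_ifs with h
  · rw [PySem.List.slice_to a (by omega)]
    have : ((i : Int) + 1).toNat = i + 1 := by omega
    rw [this, List.contains_iff_mem]
    have hw := pvWindow a (i + 1) 0
    rw [List.drop_zero] at hw
    rw [hw]
    constructor
    · intro h2; exact ⟨by exact_mod_cast h2, by omega⟩
    · intro h2; exact_mod_cast h2.1
  · have h0 : (0 : Int) ≤ (i : Int) - tau := by omega
    rw [PySem.List.slice_toNat a h0 (by omega), List.contains_iff_mem]
    have htn : ((i : Int) + 1).toNat = i + 1 := by omega
    rw [htn]
    have hdt : (a.drop ((i : Int) - tau).toNat).take (i + 1 - ((i : Int) - tau).toNat)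
        = (a.take (i + 1)).drop ((i : Int) - tau).toNat := by
      rw [List.drop_take]
    rw [hdt, pvWindow a (i + 1) (((i : Int) - tau).toNat)]
    have : ((((i : Int) - tau).toNat : Nat) : Int) = (i : Int) - tau := by omega
    rw [this]
    constructor
    · intro h2; exact ⟨by omega, h2⟩
    · intro h2; exact h2.2

theorem pvCnt_append (a : List Int) (tau : Int) (u v : List Int) (s : Nat) :
    pvCnt a tau (u ++ v) s = pvCnt a tau u s + pvCnt a tau v (s + u.length) := by
  induction u generalizing s with
  | nil => simp [pvCnt]
  | cons w u ih => simp only [List.cons_append, pvCnt, ih, List.length_cons]; ring_nf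

theorem pvCnt_no_one (a : List Int) (tau : Int) (u : List Int) (s : Nat) (h : (1 : Int) ∉ u) :
    pvCnt a tau u s = 0 := by
  induction u generalizing s with
  | nil => rfl
  | cons w u ih =>
    simp only [List.mem_cons, not_or] at h
    simp [pvCnt, Ne.symm h.1, ih _ h.2]

-- A-side loop invariant
theorem pvAloop (a : List Int) (b : List Int) (tau : Int) :
    ∀ (k : Nat) (t : List Int) (s : Nat) (x : Int), b.drop s = t → t.count 1 = k →
      ((pvStepA a b tau)^[k] ((s : Int), x)).2 = x + pvCnt a tau t s := by
  intro k
  induction k with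
  | zero =>
    intro t s x hdrop hcnt
    have : (1 : Int) ∉ t := by
      intro hm; have := List.count_pos_iff.mpr hm; omega
    simp [Function.iterate_zero, pvCnt_no_one a tau t s this]
  | succ k ih =>
    intro t s x hdrop hcnt
    have hmem : (1 : Int) ∈ t := by
      apply List.count_pos_iff.mp; omega
    obtain ⟨f, hf⟩ := Option.isSome_iff_exists.mp ((PySem.List.index?_isSome_iff _ _).mpr hmem)
    obtain ⟨pre, suf, hsplit, hlen, hnot⟩ := (PySem.List.index?_eq_some_iff _ _ _).mp hf
    rw [Function.iterate_succ_apply]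
    have hstep : pvStepA a b tau ((s : Int), x) =
        (((s + f : Nat) : Int) + 1,
         x + (if 0 ≤ pvLastOne a ((s + f) + 1) ∧ ((s + f : Nat) : Int) - tau ≤ pvLastOne a ((s + f) + 1)
              then 1 else 0)) := by
      unfold pvStepA
      rw [PySem.List.slice_from_natCast, hdrop, hf]
      have hi : (f : Int) + (s : Int) = ((s + f : Nat) : Int) := by push_cast; ring
      dsimp only
      rw [hi]
      have hC := pvCondA a tau (s + f)
      simp only [hC]
      split_ifs with h <;> simp
    rw [hstep]
    have hsufdrop : b.drop (s + f + 1) = suf := by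
      have : (b.drop s).drop (f + 1) = suf := by
        rw [hdrop, hsplit, ← hlen, ← Nat.add_comm 1 pre.length]
        rw [List.drop_append]
        simp
      rw [← this, List.drop_drop]; ring_nf
    have hsufcnt : suf.count 1 = k := by
      have hp : pre.count 1 = 0 := List.count_eq_zero.mpr hnot
      rw [hsplit] at hcnt
      simp [List.count_append, hp] at hcnt
      omega
    have hcast : ((s + f : Nat) : Int) + 1 = ((s + f + 1 : Nat) : Int) := by push_cast; ring
    rw [hcast, ih suf (s + f + 1) _ hsufdrop hsufcnt]
    rw [hsplit, pvCnt_append, pvCnt_no_one a tau pre s hnot, hlen]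
    simp only [pvCnt, zero_add, true_and]
    ring

-- B-side loop invariant
theorem pvBloop (a : List Int) (tau : Int) :
    ∀ (t : List Int) (s : Nat) (x : Int),
      ((PySem.List.enumerate t (s : Int)).foldl (pvStepB a tau) (pvLastOne a s, x)).2
        = x + pvCnt a tau t s := by
  intro t
  induction t with
  | nil => intro s x; simp [PySem.List.enumerate_nil, pvCnt]
  | cons v t ih =>
    intro s x
    rw [PySem.List.enumerate_cons, List.foldl_cons]
    have hlast : pvStepB a tau (pvLastOne a s, x) ((s : Int), v)
        = (pvLastOne a (s + 1),
           if v = 1 ∧ 0 ≤ pvLastOne a (s + 1) ∧ (s : Int) - tau ≤ pvLastOne a (s + 1)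
           then x + 1 else x) := by
      unfold pvStepB
      have h1 : ((s : Int) < (a.length : Int) ∧ PySem.List.pyGetD a (s : Int) 0 = 1)
          ↔ (s < a.length ∧ a.getD s 0 = 1) := by
        rw [PySem.List.pyGetD_natCast]
        exact and_congr_left fun _ => Nat.cast_lt
      simp only [pvLastOne, h1]
      split_ifs with h2 h3 <;> simp
    rw [hlast]
    have hcast : (s : Int) + 1 = ((s + 1 : Nat) : Int) := by push_cast; ring
    rw [hcast]
    split_ifs with h
    · rw [ih (s + 1) (x + 1)]
      simp only [pvCnt]
      rw [if_pos h]; ring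
    · rw [ih (s + 1) x]
      simp only [pvCnt]
      rw [if_neg h]; ring

-- ===== VERDICT (by name: the statement is the Claim_ definition above) =====
theorem confronta_ab_spec : Claim_equal_confronta_ab := by
  intro a b tau _
  unfold Spec_confronta_ab
  have hA : confronta_ab a b tau = pvCnt a tau b 0 := by
    unfold confronta_ab
    rw [List.foldl_const (pvStepA a b tau) ((0 : Int), (0 : Int)) (List.range (PySem.List.count b 1))]
    have hk : (List.range (PySem.List.count b 1)).length = b.count 1 := by
      rw [List.length_range, PySem.List.count_eq]
    rw [hk]
    have := pvAloop a b tau (b.count 1) b 0 0 (by simp) rfl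
    simpa using this
  have hB : confronta_ab_alt a b tau = pvCnt a tau b 0 := by
    unfold confronta_ab_alt
    have := pvBloop a tau b 0 0
    simpa [pvLastOne] using this
  rw [hA, hB]
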